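-- pv_equiv track=rewrite | github.com/NickTheWhale/camdraw | main.py | editor_closest_point
-- ===== SOURCE A (Python) =====
-- def editor_closest_point(position, curve):
--     if curve is not None:
--         number_of_points = len(curve)
--         dx = position[0] - curve[0][0]
--         dy = position[1] - curve[0][1]
--         current_distance = (dx * dx) + (dy * dy)
--         min_distance = current_distance
--         min_distance_index = 0
--         index = 1
--         while index < number_of_points:
--             dx = position[0] - curve[index][0]
--             dy = position[1] - curve[index][1]
--             current_distance = (dx * dx) + (dy * dy)
--             if current_distance < min_distance:
--                 min_distance = current_distance
--                 min_distance_index = index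
--             index += 1
--         closet_position = (curve[min_distance_index][0], curve[min_distance_index][1])
--         return closet_position, min_distance, min_distance_index
--     return None, None, None
-- ===== SOURCE B (Python) =====
-- def editor_closest_point(position, curve):
--     if curve is None:
--         return None, None, None
--     dists = [(position[0] - p[0]) ** 2 + (position[1] - p[1]) ** 2 for p in curve]
--     min_distance = min(dists)
--     min_distance_index = dists.index(min_distance)
--     x, y = curve[min_distance_index]
--     return (x, y), min_distance, min_distance_index
-- ===== Notes on version B (the rewrite author's own statement) =====
-- stated objective: simpler
-- what changed: Replaces A's fused index-tracking while-loop with a two-phase shape: build the list of squared distances once, then use min() and list.index() for the minimum and its earliest index.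
-- outside the precondition, e.g. on editor_closest_point((0, 0), []): A raises IndexError, B raises ValueError
import Mathlib
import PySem

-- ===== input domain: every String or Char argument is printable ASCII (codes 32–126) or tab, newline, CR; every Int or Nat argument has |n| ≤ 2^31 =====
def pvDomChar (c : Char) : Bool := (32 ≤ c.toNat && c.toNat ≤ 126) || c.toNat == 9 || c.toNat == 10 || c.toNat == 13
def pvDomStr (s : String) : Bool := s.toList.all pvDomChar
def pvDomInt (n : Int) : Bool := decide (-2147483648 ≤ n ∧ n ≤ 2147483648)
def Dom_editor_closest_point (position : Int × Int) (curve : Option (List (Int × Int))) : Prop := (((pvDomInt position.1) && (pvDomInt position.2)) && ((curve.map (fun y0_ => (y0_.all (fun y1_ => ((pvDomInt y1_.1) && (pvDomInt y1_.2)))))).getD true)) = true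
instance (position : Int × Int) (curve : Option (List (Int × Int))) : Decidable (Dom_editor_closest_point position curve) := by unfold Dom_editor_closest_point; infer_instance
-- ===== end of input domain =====

-- B replaces A's fused index-tracking while-loop by a two-phase shape — build the squared-distance table once, then min()/index() — for simplicity (no speed claim).

-- ===== PORT A =====
-- curve[0] raises IndexError on the empty curve (excluded by Pre_); the loop and final
-- indices are always in range, so pyGetD is exact there.
def editor_closest_point (position : Int × Int) (curve : Option (List (Int × Int))) : (Option (Int × Int)) × Option Int × Option Int :=
  match curve with
  | some cs =>
    let number_of_points : Int := (cs.length : Int)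
    let p0 := PySem.List.pyGetD cs 0 (0, 0)
    let dx := position.1 - p0.1
    let dy := position.2 - p0.2
    let current_distance := dx * dx + dy * dy
    let st := (PySem.List.pyRange 1 number_of_points 1).foldl
      (fun (st : Int × Int) index =>
        let p := PySem.List.pyGetD cs index (0, 0)
        let dx := position.1 - p.1
        let dy := position.2 - p.2
        let current_distance := dx * dx + dy * dy
        if current_distance < st.1 then (current_distance, index) else st)
      (current_distance, 0)
    let q := PySem.List.pyGetD cs st.2 (0, 0)
    (some (q.1, q.2), some st.1, some st.2)
  | none => (none, none, none)

-- ===== PORT B =====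
-- min([]) raises ValueError and a failed .index raises ValueError; both branches are unreachable under Pre_.
def editor_closest_point_alt (position : Int × Int) (curve : Option (List (Int × Int))) : (Option (Int × Int)) × Option Int × Option Int :=
  match curve with
  | none => (none, none, none)
  | some cs =>
    let dists := cs.map (fun p => (position.1 - p.1) ^ 2 + (position.2 - p.2) ^ 2)
    match PySem.List.min? dists (fun x => x) with
    | none => (none, none, none)
    | some min_distance =>
      match PySem.List.index? dists min_distance with
      | none => (none, none, none)
      | some min_distance_index =>
        let q := PySem.List.pyGetD cs (min_distance_index : Int) (0, 0)
        (some (q.1, q.2), some min_distance, some (min_distance_index : Int))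

-- ===== PRECONDITION & SPEC =====
-- Pre_ excludes curve = some [] (the empty curve), on which A raises IndexError at curve[0] (and B raises ValueError at min([])).
def Pre_editor_closest_point (position : Int × Int) (curve : Option (List (Int × Int))) : Prop := curve ≠ some []
instance (position : Int × Int) (curve : Option (List (Int × Int))) : Decidable (Pre_editor_closest_point position curve) := by unfold Pre_editor_closest_point; infer_instance
def pvWitness_editor_closest_point : (Int × Int) × (Option (List (Int × Int))) := ((1, 2), some [(0, 0), (1, 3), (1, 3)])

def Spec_editor_closest_point (position : Int × Int) (curve : Option (List (Int × Int))) (out : (Option (Int × Int)) × Option Int × Option Int) : Prop := out = editor_closest_point_alt position curve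
instance (position : Int × Int) (curve : Option (List (Int × Int))) (out : (Option (Int × Int)) × Option Int × Option Int) : Decidable (Spec_editor_closest_point position curve out) := by unfold Spec_editor_closest_point; infer_instance

-- ===== CLAIM (what is proved, stated in full; the proofs are below) =====
def Claim_equal_editor_closest_point : Prop := ∀ (position : Int × Int) (curve : Option (List (Int × Int))), Dom_editor_closest_point position curve → Pre_editor_closest_point position curve → Spec_editor_closest_point position curve (editor_closest_point position curve)

-- ===== LEMMAS AND PROOFS =====

-- If m is a member of t and a lower bound of t, then it is THE value of Python's min(t).
theorem pv_min?_eq {t : List Int} {m : Int} (hm : m ∈ t) (hlb : ∀ y ∈ t, m ≤ y) :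
    PySem.List.min? t (fun x => x) = some m := by
  cases h : PySem.List.min? t (fun x => x) with
  | none =>
    rw [PySem.List.min?_eq_none_iff] at h
    subst h; simp at hm
  | some m' =>
    have h1 := PySem.List.min?_mem h
    have h2 := PySem.List.min?_isMin h m hm
    have h3 := hlb m' h1
    exact congrArg some (le_antisymm h2 h3)

-- If t[j] = m and no earlier entry equals m, then t.index(m) = j.
theorem pv_index?_eq {t : List Int} {m : Int} {j : Nat} (hj : t[j]? = some m)
    (hfirst : ∀ i < j, t[i]? ≠ some m) : PySem.List.index? t m = some j := by
  have hmem : m ∈ t := List.mem_of_getElem? hj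
  cases h : PySem.List.index? t m with
  | none =>
    rw [PySem.List.index?_eq_none_iff] at h
    exact absurd hmem h
  | some j' =>
    obtain ⟨hk, hval, hbefore⟩ := PySem.List.getElem_of_index?_eq_some h
    rcases lt_trichotomy j j' with hlt | heq | hgt
    · have hjlen : j < t.length := (List.getElem?_eq_some_iff.mp hj).1
      have := hbefore j hlt
      rw [List.getElem?_eq_getElem hjlen] at hj
      simp at hj
      exact absurd hj this
    · rw [heq]
    · have := hfirst j' hgt
      rw [List.getElem?_eq_getElem hk, hval] at this
      simp at this

-- Invariant of A's scan: after processing indices 1..k the state is the minimum of the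
-- first k+1 distances together with the earliest index attaining it.
theorem pv_fold_inv (d : (Int × Int) → Int) (cs : List (Int × Int)) (k : Nat) (hk : k < cs.length) :
    ∃ (m : Int) (j : Nat),
      (PySem.List.pyRange 1 ((k : Int) + 1) 1).foldl
        (fun (st : Int × Int) index =>
          if d (PySem.List.pyGetD cs index (0, 0)) < st.1
          then (d (PySem.List.pyGetD cs index (0, 0)), index) else st)
        (d (PySem.List.pyGetD cs 0 (0, 0)), 0) = (m, (j : Int)) ∧
      j ≤ k ∧
      (∀ y ∈ (cs.take (k + 1)).map d, m ≤ y) ∧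
      ((cs.take (k + 1)).map d)[j]? = some m ∧
      (∀ i < j, ((cs.take (k + 1)).map d)[i]? ≠ some m) := by
  induction k with
  | zero =>
    have h0 : PySem.List.pyGetD cs 0 (0, 0) = cs[0] :=
      PySem.List.pyGetD_eq_getElem cs (0, 0) (le_refl 0) (by exact_mod_cast hk)
    have ht : (cs.take 1).map d = [d cs[0]] := by
      rw [List.take_add_one, List.take_zero, List.getElem?_eq_getElem hk]
      rfl
    refine ⟨d (PySem.List.pyGetD cs 0 (0, 0)), 0, ?_, le_refl _, ?_, ?_, ?_⟩
    · rw [PySem.List.pyRange_one_eq_nil (by omega)]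
      rfl
    · intro y hy
      rw [ht] at hy
      simp at hy
      rw [hy, h0]
    · rw [ht, h0]
      rfl
    · intro i hi; omega
  | succ k ih =>
    obtain ⟨m, j, hfold, hj, hlb, hget, hfirst⟩ := ih (by omega)
    have hk1 : k + 1 < cs.length := hk
    have htlen : (List.map d (List.take (k + 1) cs)).length = k + 1 := by
      rw [List.length_map, List.length_take]; omega
    have hrange : PySem.List.pyRange 1 (((k+1 : Nat) : Int) + 1) 1
        = PySem.List.pyRange 1 ((k : Int) + 1) 1 ++ [(k : Int) + 1] := by
      push_cast
      rw [PySem.List.pyRange_one_succ_right (by omega)]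
    have hc : PySem.List.pyGetD cs ((k : Int) + 1) (0, 0) = cs[k+1] := by
      rw [PySem.List.pyGetD_eq_getElem cs (0, 0) (by omega) (by exact_mod_cast hk1)]
      congr 1
    have htake : (cs.take (k + 1 + 1)).map d = (cs.take (k + 1)).map d ++ [d cs[k+1]] := by
      have h1 : cs.take (k + 1 + 1) = cs.take (k + 1) ++ [cs[k+1]] := by
        rw [List.take_add_one, List.getElem?_eq_getElem hk1]
        rfl
      rw [h1, List.map_append]
      rfl
    rw [hrange, List.foldl_append, hfold]
    simp only [List.foldl_cons, List.foldl_nil, hc]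
    by_cases hcm : d cs[k+1] < m
    · refine ⟨d cs[k+1], k + 1, ?_, le_refl _, ?_, ?_, ?_⟩
      · simp [hcm]
      · intro y hy
        rw [htake] at hy
        rcases List.mem_append.mp hy with h | h
        · have := hlb y h; omega
        · simp at h; omega
      · rw [htake, List.getElem?_append_right (by omega), htlen]
        simp
      · intro i hi
        rw [htake, List.getElem?_append_left (by omega)]
        intro hbad
        have hmem : d cs[k+1] ∈ (cs.take (k + 1)).map d := List.mem_of_getElem? hbad
        have := hlb _ hmem
        omega
    · refine ⟨m, j, ?_, by omega, ?_, ?_, ?_⟩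
      · simp [hcm]
      · intro y hy
        rw [htake] at hy
        rcases List.mem_append.mp hy with h | h
        · exact hlb y h
        · simp at h; omega
      · rw [htake, List.getElem?_append_left (by omega)]
        exact hget
      · intro i hi
        rw [htake, List.getElem?_append_left (by omega)]
        exact hfirst i hi

-- A = B on every non-empty curve.
theorem pv_main (position : Int × Int) (curve : Option (List (Int × Int)))
    (hpre : curve ≠ some []) :
    editor_closest_point position curve = editor_closest_point_alt position curve := by
  cases curve with
  | none => rfl
  | some cs =>
    cases cs with
    | nil => exact absurd rfl hpre
    | cons a l =>
      set d : (Int × Int) → Int := fun p =>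
        (position.1 - p.1) * (position.1 - p.1) + (position.2 - p.2) * (position.2 - p.2) with hd
      have hlen : ((l.length : Nat) : Int) + 1 = (((a :: l).length : Nat) : Int) := by
        simp
      obtain ⟨m, j, hfold, hj, hlb, hget, hfirst⟩ :=
        pv_fold_inv d (a :: l) l.length (by simp)
      rw [hlen] at hfold
      simp only [hd] at hfold
      have htk : (a :: l).take (l.length + 1) = a :: l :=
        List.take_of_length_le (by simp)
      rw [htk] at hlb hget hfirst
      -- B's distance table is the map of d
      have hdists : (a :: l).map (fun p => (position.1 - p.1) ^ 2 + (position.2 - p.2) ^ 2)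
          = (a :: l).map d := by
        apply List.map_congr_left
        intro p _
        rw [hd]
        ring
      have hmin : PySem.List.min? ((a :: l).map d) (fun x => x) = some m :=
        pv_min?_eq (List.mem_of_getElem? hget) hlb
      have hidx : PySem.List.index? ((a :: l).map d) m = some j :=
        pv_index?_eq hget hfirst
      -- evaluate both sides
      show editor_closest_point position (some (a :: l)) = _
      simp only [editor_closest_point, editor_closest_point_alt, hdists, hmin, hidx]
      rw [hfold]

-- ===== VERDICT (by name: the statement is the Claim_ definition above) =====
theorem editor_closest_point_spec : Claim_equal_editor_closest_point := by
  intro position curve _ hpre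
  exact pv_main position curve hpre
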